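-- pv_equiv track=rewrite | github.com/wagner-austin/API | services/transcript-api/src/transcript_api/whisper_parse.py | _is_numeric_str
-- ===== SOURCE A (Python) =====
-- def _is_numeric_str(s: str) -> bool:
--     digits = set("0123456789")
--     if not s:
--         return False
--     if s[0] in "+-":
--         s = s[1:]
--         if not s:
--             return False
--     dot_seen = False
--     digit_seen = True  # A numeric string must have at least one digit
--     for ch in s:
--         if ch == ".":
--             if dot_seen:
--                 return False
--             dot_seen = True
--         elif ch in digits:
--             digit_seen = True
--         else:
--             return False
--     return digit_seen
-- ===== SOURCE B (Python) =====
-- def _is_numeric_str(s: str) -> bool: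
--     if not s:
--         return False
--     body = s[1:] if s[0] in "+-" else s
--     if not body:
--         return False
--     return body.count(".") <= 1 and all(c in "0123456789." for c in body)
-- ===== Notes on version B (the rewrite author's own statement) =====
-- stated objective: simpler
-- what changed: Replaced the single stateful loop tracking dot_seen with two aggregate passes: a dot count (<= 1) and an all() membership check over digits-or-dot.
import Mathlib
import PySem

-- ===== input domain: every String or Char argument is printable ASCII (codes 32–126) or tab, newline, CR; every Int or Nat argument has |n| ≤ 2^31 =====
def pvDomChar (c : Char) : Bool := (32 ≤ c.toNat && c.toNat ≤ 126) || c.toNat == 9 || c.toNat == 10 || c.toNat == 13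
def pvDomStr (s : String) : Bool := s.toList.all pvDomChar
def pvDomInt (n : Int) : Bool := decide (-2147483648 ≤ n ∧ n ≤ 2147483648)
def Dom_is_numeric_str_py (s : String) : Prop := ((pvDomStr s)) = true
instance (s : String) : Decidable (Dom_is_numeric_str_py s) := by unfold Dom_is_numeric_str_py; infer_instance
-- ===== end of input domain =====

-- B replaces A's single stateful dot_seen loop with two aggregate passes (a dot count ≤ 1 and an all-membership check); objective: simpler.


-- ===== PORT A =====
def pvDigits : List Char := "0123456789".toList

def pvALoop : List Char → Bool → Bool → Bool
  | [], _, digit_seen => digit_seen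
  | ch :: rest, dot_seen, digit_seen =>
    if ch = '.' then
      if dot_seen then false else pvALoop rest true digit_seen
    else if pvDigits.contains ch then
      pvALoop rest dot_seen true
    else false

def is_numeric_str_py (s : String) : Bool :=
  match s.toList with
  | [] => false
  | c :: rest =>
    let body := if ("+-".toList).contains c then rest else c :: rest
    if body = [] then false else pvALoop body false true

-- ===== PORT B =====
def is_numeric_str_py_alt (s : String) : Bool :=
  match s.toList with
  | [] => false
  | c :: rest =>
    let body := if ("+-".toList).contains c then rest else c :: rest
    if body = [] then false
    else decide (body.count '.' ≤ 1) && body.all (fun ch => ("0123456789.".toList).contains ch)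

-- ===== PRECONDITION & SPEC =====
def Spec_is_numeric_str_py (s : String) (out : Bool) : Prop := out = is_numeric_str_py_alt s
instance (s : String) (out : Bool) : Decidable (Spec_is_numeric_str_py s out) := by unfold Spec_is_numeric_str_py; infer_instance

-- ===== CLAIM (what is proved, stated in full; the proofs are below) =====
def Claim_equal_is_numeric_str_py : Prop := ∀ (s : String), Dom_is_numeric_str_py s → Spec_is_numeric_str_py s (is_numeric_str_py s)

-- ===== LEMMAS AND PROOFS =====

-- ===== VERDICT (by name: the statement is the Claim_ definition above) =====
lemma pvALoop_eq (l : List Char) : ∀ dot : Bool,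
    pvALoop l dot true =
      ((decide (l.count '.' + (if dot then 1 else 0) ≤ 1)) &&
        l.all (fun ch => ("0123456789.".toList).contains ch)) := by
  induction l with
  | nil => intro dot; cases dot <;> simp [pvALoop]
  | cons c rest ih =>
    intro dot
    by_cases hd : c = '.'
    · subst hd
      cases dot <;> simp [pvALoop, ih, List.count_cons] <;> omega
    · by_cases hdig : pvDigits.contains c
      · have hc : c = '0' ∨ c = '1' ∨ c = '2' ∨ c = '3' ∨ c = '4' ∨ c = '5' ∨
            c = '6' ∨ c = '7' ∨ c = '8' ∨ c = '9' := by simpa [pvDigits] using hdig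
        rcases hc with h | h | h | h | h | h | h | h | h | h <;> subst h <;>
          simp [pvALoop, pvDigits, ih]
      · have hc : c ∉ pvDigits := by simpa using hdig
        have h9 : ¬(c = '0' ∨ c = '1' ∨ c = '2' ∨ c = '3' ∨ c = '4' ∨ c = '5' ∨
            c = '6' ∨ c = '7' ∨ c = '8' ∨ c = '9') := by simpa [pvDigits] using hc
        push Not at h9
        obtain ⟨h0, h1, h2, h3, h4, h5, h6, h7, h8, h9'⟩ := h9
        simp [pvALoop, hd, h0, h1, h2, h3, h4, h5, h6, h7, h8, h9']
        exact fun h => absurd h hc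

theorem is_numeric_str_py_spec : Claim_equal_is_numeric_str_py := by
  intro s _
  unfold Spec_is_numeric_str_py is_numeric_str_py is_numeric_str_py_alt
  cases h : s.toList with
  | nil => rfl
  | cons c rest =>
    simp only []
    by_cases hsign : ("+-".toList).contains c <;>
      simp [pvALoop_eq]
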